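-- pv_equiv track=rewrite | github.com/barrucadu/nixfiles | hosts/nyarlathotep/jobs/hledger-export-to-promscale.py | running_totals
-- ===== SOURCE A (Python) =====
-- def running_totals(deltas_by_timestamp):
--     """Turn `timestamp => key => delta` to `timestamp => key => total` by
--     summing deltas in order.
--     """
--
--     current = {}
--     out = {}
--     for timestamp in sorted(deltas_by_timestamp.keys()):
--         for k, delta in deltas_by_timestamp[timestamp].items():
--             current[k] = current.get(k, 0) + delta
--         out[timestamp] = {k: v for k, v in current.items()}
--     return out
-- ===== SOURCE B (Python) =====
-- def running_totals(deltas_by_timestamp):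
--     """Turn `timestamp => key => delta` to `timestamp => key => total` by
--     summing deltas in order.
--
--     Stateless re-implementation: each snapshot is computed directly as a
--     prefix sum over the sorted timestamps, instead of maintaining a running
--     accumulator across the loop.
--     """
--     ts_sorted = sorted(deltas_by_timestamp.keys())
--     out = {}
--     for i, ts in enumerate(ts_sorted):
--         prefix = ts_sorted[: i + 1]
--         keys = dict.fromkeys(k for t in prefix for k in deltas_by_timestamp[t])
--         out[ts] = {
--             k: sum(deltas_by_timestamp[t].get(k, 0) for t in prefix)
--             for k in keys
--         }
--     return out
-- ===== Notes on version B (the rewrite author's own statement) =====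
-- stated objective: alternative
-- what changed: B drops A's running accumulator dict entirely: for each sorted timestamp it computes the snapshot directly, taking the first-appearance-ordered keys of the prefix and summing each key's deltas over the prefix (a prefix-sum formula per timestamp instead of incremental state carried across the loop).
import Mathlib
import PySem

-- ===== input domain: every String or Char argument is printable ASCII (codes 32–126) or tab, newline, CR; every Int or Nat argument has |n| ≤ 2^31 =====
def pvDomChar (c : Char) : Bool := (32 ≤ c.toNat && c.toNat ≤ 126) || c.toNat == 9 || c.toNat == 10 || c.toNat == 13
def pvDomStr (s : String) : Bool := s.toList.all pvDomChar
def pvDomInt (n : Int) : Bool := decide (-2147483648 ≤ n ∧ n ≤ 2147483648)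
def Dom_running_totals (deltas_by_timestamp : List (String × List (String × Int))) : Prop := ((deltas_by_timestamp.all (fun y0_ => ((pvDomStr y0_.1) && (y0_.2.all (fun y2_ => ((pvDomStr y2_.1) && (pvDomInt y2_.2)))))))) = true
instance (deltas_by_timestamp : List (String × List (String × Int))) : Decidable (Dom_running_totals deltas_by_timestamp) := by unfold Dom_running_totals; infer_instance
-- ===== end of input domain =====

-- B replaces A's running accumulator with a direct prefix-sum formula per snapshot (objective: alternative, not faster).

-- ===== PORT A =====
-- The Python argument is a dict of dicts; per the type convention it arrives as an
-- association list, which we turn into PySem.Dicts exactly as Python's dict does.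
def running_totals (deltas_by_timestamp : List (String × List (String × Int))) : List (String × List (String × Int)) :=
  let d : PySem.Dict String (PySem.Dict String Int) :=
    PySem.Dict.ofList (deltas_by_timestamp.map (fun p => (p.1, PySem.Dict.ofList p.2)))
  -- current = {}; out = {}; for timestamp in sorted(d.keys()): …
  -- d.getD timestamp ∅ is deltas_by_timestamp[timestamp]: timestamp ranges over d's own keys, so the lookup never misses
  let st := (PySem.List.sorted d.keys (fun x => x) false).foldl
    (fun (st : PySem.Dict String Int × PySem.Dict String (List (String × Int))) timestamp =>
      let current := (d.getD timestamp PySem.Dict.empty).items.foldl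
        (fun (c : PySem.Dict String Int) kd => c.insert kd.1 (c.getD kd.1 0 + kd.2)) st.1
      (current, st.2.insert timestamp current.items))
    (PySem.Dict.empty, PySem.Dict.empty)
  st.2.items

-- ===== PORT B =====
-- out[ts] for ts = ts_sorted[i]: keys in first-appearance order over the prefix,
-- each mapped to the sum of its deltas over the prefix (dict.get(k, 0) = getD k 0).
def pvSnapB (d : PySem.Dict String (PySem.Dict String Int)) (ts_sorted : List String) (i : Int) : List (String × Int) :=
  let pre := PySem.List.slice ts_sorted none (some (i + 1))    -- ts_sorted[: i + 1]
  let keys := PySem.List.dedup (pre.flatMap (fun t => (d.getD t PySem.Dict.empty).keys))  -- dict.fromkeys(…)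
  keys.map (fun k => (k, (pre.map (fun t => (d.getD t PySem.Dict.empty).getD k 0)).sum))

def running_totals_alt (deltas_by_timestamp : List (String × List (String × Int))) : List (String × List (String × Int)) :=
  let d : PySem.Dict String (PySem.Dict String Int) :=
    PySem.Dict.ofList (deltas_by_timestamp.map (fun p => (p.1, PySem.Dict.ofList p.2)))
  let ts_sorted := PySem.List.sorted d.keys (fun x => x) false
  ((PySem.List.enumerate ts_sorted).foldl
    (fun (out : PySem.Dict String (List (String × Int))) p => out.insert p.2 (pvSnapB d ts_sorted p.1))
    PySem.Dict.empty).items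

-- ===== PRECONDITION & SPEC =====
def Spec_running_totals (deltas_by_timestamp : List (String × List (String × Int))) (out : List (String × List (String × Int))) : Prop := out = running_totals_alt deltas_by_timestamp
instance (deltas_by_timestamp : List (String × List (String × Int))) (out : List (String × List (String × Int))) : Decidable (Spec_running_totals deltas_by_timestamp out) := by unfold Spec_running_totals; infer_instance

-- ===== CLAIM (what is proved, stated in full; the proofs are below) =====
def Claim_equal_running_totals : Prop := ∀ (deltas_by_timestamp : List (String × List (String × Int))), Dom_running_totals deltas_by_timestamp → Spec_running_totals deltas_by_timestamp (running_totals deltas_by_timestamp)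

-- ===== LEMMAS AND PROOFS =====

-- keys of the snapshot at prefix P, in first-appearance order
def pvSnapKeys (d : PySem.Dict String (PySem.Dict String Int)) (P : List String) : List String :=
  PySem.List.dedup (P.flatMap (fun t => (d.getD t PySem.Dict.empty).keys))

-- running total of key k over prefix P
def pvSnapVal (d : PySem.Dict String (PySem.Dict String Int)) (P : List String) (k : String) : Int :=
  (P.map (fun t => (d.getD t PySem.Dict.empty).getD k 0)).sum

def pvSnapItems (d : PySem.Dict String (PySem.Dict String Int)) (P : List String) : List (String × Int) :=
  (pvSnapKeys d P).map (fun k => (k, pvSnapVal d P k))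

-- the full expected output, timestamp by timestamp
def pvSnapList (d : PySem.Dict String (PySem.Dict String Int)) (P : List String) : List String → List (String × List (String × Int))
  | [] => []
  | t :: Q => (t, pvSnapItems d (P ++ [t])) :: pvSnapList d (P ++ [t]) Q

-- L1: the inner accumulation loop adds, at each key, the sum of the matching deltas
theorem pv_getD_foldl_insert_add (l : List (String × Int)) (c : PySem.Dict String Int) (k : String) :
    (l.foldl (fun (c : PySem.Dict String Int) kd => c.insert kd.1 (c.getD kd.1 0 + kd.2)) c).getD k 0
      = c.getD k 0 + ((l.filter (fun p => p.1 == k)).map Prod.snd).sum := by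
  induction l generalizing c with
  | nil => simp
  | cons p l ih =>
      simp only [List.foldl_cons, ih, List.filter_cons]
      by_cases h : p.1 = k
      · simp [h]; ring
      · simp [h, PySem.Dict.getD_insert, Ne.symm h]


-- L2 (list form): on a Nodup-key association list, that sum is the dict lookup
theorem pv_filter_sum_eq_getD (l : List (String × Int)) (k : String) (h : (l.map Prod.fst).Nodup) :
    ((l.filter (fun p => p.1 == k)).map Prod.snd).sum = (PySem.Dict.mk l).getD k 0 := by
  induction l with
  | nil => simp [PySem.Dict.getD, PySem.Dict.get?]
  | cons p l ih =>
      obtain ⟨a, v⟩ := p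
      simp only [List.map_cons, List.nodup_cons] at h
      rw [PySem.Dict.getD, PySem.Dict.get?_mk_cons]
      by_cases hk : a = k
      · have hnil : l.filter (fun p => p.1 == k) = [] := by
          apply List.filter_eq_nil_iff.mpr
          intro q hq hb
          exact h.1 (by simp at hb; exact hk ▸ hb ▸ List.mem_map.mpr ⟨q, hq, rfl⟩)
        simp [hk, hnil]
      · have := ih h.2
        rw [PySem.Dict.getD] at this
        simp [hk, this]

theorem pv_filter_sum_eq_getD' (e : PySem.Dict String Int) (k : String) (h : e.keys.Nodup) :
    ((e.items.filter (fun p => p.1 == k)).map Prod.snd).sum = e.getD k 0 :=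
  pv_filter_sum_eq_getD e.items k h

-- L3: a dict with Nodup keys is its keys paired with their lookups
theorem pv_items_eq_keys_map (e : PySem.Dict String Int) (h : e.keys.Nodup) :
    e.items = e.keys.map (fun k => (k, e.getD k 0)) := by
  obtain ⟨l⟩ := e
  simp only [PySem.Dict.keys] at *
  induction l with
  | nil => simp
  | cons p l ih =>
      obtain ⟨a, v⟩ := p
      simp only [List.map_cons, List.nodup_cons] at h
      simp only [List.map_cons, List.map_map, List.cons.injEq]
      refine ⟨by rw [PySem.Dict.getD, PySem.Dict.get?_mk_cons]; simp, ?_⟩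
      conv_lhs => rw [ih h.2]
      simp only [List.map_map]
      apply List.map_congr_left
      intro b hb
      simp only [Function.comp]
      have hne : a ≠ b.1 := fun he => h.1 (he ▸ List.mem_map.mpr ⟨b, hb, rfl⟩)
      rw [PySem.Dict.getD, PySem.Dict.getD, PySem.Dict.get?_mk_cons]
      simp [hne]

-- every value of the converted outer dict keeps Nodup keys through the insert loop
theorem pv_values_nodup (ps : List (String × PySem.Dict String Int)) :
    ∀ (d0 : PySem.Dict String (PySem.Dict String Int)),
    (∀ w ∈ d0.values, w.keys.Nodup) → (∀ p ∈ ps, p.2.keys.Nodup) →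
    ∀ w ∈ (d0.update ps).values, w.keys.Nodup := by
  induction ps with
  | nil => intro d0 h0 _ w hw; exact h0 w hw
  | cons p ps ih =>
      intro d0 h0 hp w hw
      refine ih (d0.insert p.1 p.2) ?_ (fun q hq => hp q (List.mem_cons_of_mem _ hq)) w hw
      intro u hu
      rcases PySem.Dict.mem_values_insert d0 p.1 p.2 u hu with h | h
      · exact h ▸ hp p List.mem_cons_self
      · exact h0 u h

-- every inner dict of the converted input has Nodup keys
theorem pv_inner_nodup (input : List (String × List (String × Int))) (t : String) :
    ((PySem.Dict.ofList (input.map (fun p => (p.1, PySem.Dict.ofList p.2)))).getD t PySem.Dict.empty).keys.Nodup := by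
  set d := PySem.Dict.ofList (input.map (fun p => (p.1, PySem.Dict.ofList p.2))) with hd
  rw [PySem.Dict.getD_eq_get?_getD]
  cases hg : d.get? t with
  | none => simp
  | some v =>
      have hv : v ∈ d.values := by
        have := PySem.Dict.mem_items_of_get?_eq_some (d := d) (k := t) (v := v) hg
        exact List.mem_map.mpr ⟨(t, v), this, rfl⟩
      have : ∀ w ∈ d.values, w.keys.Nodup := by
        rw [hd, PySem.Dict.ofList]
        apply pv_values_nodup
        · intro w hw; simp [PySem.Dict.values, PySem.Dict.empty] at hw
        · intro p hp
          rcases List.mem_map.mp hp with ⟨q, _, rfl⟩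
          exact PySem.Dict.nodup_keys_ofList q.2
      simpa using this v hv

theorem pv_snapKeys_append (d : PySem.Dict String (PySem.Dict String Int)) (P : List String) (t : String) :
    pvSnapKeys d (P ++ [t]) = PySem.Set.update (pvSnapKeys d P) (d.getD t PySem.Dict.empty).keys := by
  simp [pvSnapKeys, PySem.List.dedup_eq_ofList, PySem.Set.ofList_append]

theorem pv_snapVal_append (d : PySem.Dict String (PySem.Dict String Int)) (P : List String) (t : String) (k : String) :
    pvSnapVal d (P ++ [t]) k = pvSnapVal d P k + (d.getD t PySem.Dict.empty).getD k 0 := by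
  simp [pvSnapVal]

-- L5: the invariant of A's outer loop
theorem pv_mainA (d : PySem.Dict String (PySem.Dict String Int))
    (hinner : ∀ t, (d.getD t PySem.Dict.empty).keys.Nodup)
    (Q : List String) :
    ∀ (P : List String) (c : PySem.Dict String Int) (o : PySem.Dict String (List (String × Int))),
    c.keys = pvSnapKeys d P → (∀ k, c.getD k 0 = pvSnapVal d P k) →
    (∀ t ∈ Q, o.contains t = false) → Q.Nodup →
    ((Q.foldl
      (fun (st : PySem.Dict String Int × PySem.Dict String (List (String × Int))) timestamp =>
        let current := (d.getD timestamp PySem.Dict.empty).items.foldl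
          (fun (c : PySem.Dict String Int) kd => c.insert kd.1 (c.getD kd.1 0 + kd.2)) st.1
        (current, st.2.insert timestamp current.items))
      (c, o)).2).items = o.items ++ pvSnapList d P Q := by
  induction Q with
  | nil => intro P c o _ _ _ _; simp [pvSnapList]
  | cons t Q ih =>
      intro P c o hk hv hfresh hnodup
      rw [List.foldl_cons]
      simp only []
      set c' := (d.getD t PySem.Dict.empty).items.foldl
          (fun (c : PySem.Dict String Int) kd => c.insert kd.1 (c.getD kd.1 0 + kd.2)) c with hc'
      have hk' : c'.keys = pvSnapKeys d (P ++ [t]) := by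
        rw [hc', PySem.Dict.keys_foldl_insert_key ((d.getD t PySem.Dict.empty).items)
          (fun kd : String × Int => kd.1)
          (fun (c : PySem.Dict String Int) (kd : String × Int) => c.getD kd.1 0 + kd.2) c,
          hk, pv_snapKeys_append]
        rfl
      have hv' : ∀ k, c'.getD k 0 = pvSnapVal d (P ++ [t]) k := by
        intro k
        rw [hc', pv_getD_foldl_insert_add, hv, pv_filter_sum_eq_getD' _ _ (hinner t), pv_snapVal_append]
      have hnd : c'.keys.Nodup := by
        rw [hk']
        simp only [pvSnapKeys, PySem.List.dedup_eq_ofList]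
        exact PySem.Set.nodup_ofList ((P ++ [t]).flatMap (fun t => (d.getD t PySem.Dict.empty).keys))
      have hitems : c'.items = pvSnapItems d (P ++ [t]) := by
        rw [pv_items_eq_keys_map c' hnd, hk', pvSnapItems]
        exact List.map_congr_left (fun k _ => by rw [hv'])
      rw [ih (P ++ [t]) c' (o.insert t c'.items) hk' hv'
          (by
            intro u hu
            rw [PySem.Dict.contains_insert]
            have : u ≠ t := fun he => (List.nodup_cons.mp hnodup).1 (he ▸ hu)
            simp [this, hfresh u (List.mem_cons_of_mem _ hu)])
          (List.nodup_cons.mp hnodup).2]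
      rw [PySem.Dict.items_insert_of_not_contains _ _ (hfresh t List.mem_cons_self), hitems]
      simp [pvSnapList]

-- L7: B's per-index snapshots, read off against pvSnapList
theorem pv_take_append (t : String) (Q : List String) (P : List String) :
    (P ++ t :: Q).take (P.length + 1) = P ++ [t] := by
  induction P with
  | nil => simp
  | cons a P ih => simpa using ih

-- L7: B's per-index snapshots, read off against pvSnapList
theorem pv_mainB (d : PySem.Dict String (PySem.Dict String Int)) (Q : List String) :
    ∀ (P : List String),
    (PySem.List.enumerate Q (P.length : Int)).map (fun p => (p.2, pvSnapB d (P ++ Q) p.1)) = pvSnapList d P Q := by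
  induction Q with
  | nil => intro P; simp [PySem.List.enumerate_nil, pvSnapList]
  | cons t Q ih =>
      intro P
      rw [PySem.List.enumerate_cons, List.map_cons]
      have hcast : (P.length : Int) + 1 = ((P.length + 1 : Nat) : Int) := by push_cast; ring
      have hhead : pvSnapB d (P ++ t :: Q) (P.length : Int) = pvSnapItems d (P ++ [t]) := by
        rw [pvSnapB]
        simp only [hcast, PySem.List.slice_to_natCast]
        rw [pv_take_append]
        rfl
      have htail := ih (P ++ [t])
      rw [List.length_append, List.length_singleton] at htail
      rw [hhead, pvSnapList, ← htail, ← hcast]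
      congr 1
      simp

-- ===== VERDICT (by name: the statement is the Claim_ definition above) =====
theorem running_totals_spec : Claim_equal_running_totals := by
  intro input _
  show running_totals input = running_totals_alt input
  rw [running_totals, running_totals_alt]
  simp only []
  set d := PySem.Dict.ofList (input.map (fun p => (p.1, PySem.Dict.ofList p.2))) with hd
  set ts := PySem.List.sorted d.keys (fun x => x) false with hts
  have hnodup : ts.Nodup := by
    rw [hts]
    exact ((PySem.List.sorted_perm d.keys (fun x => x) false).nodup_iff).mpr
      (PySem.Dict.nodup_keys_ofList _)
  have hA := pv_mainA d (fun t => by rw [hd]; exact pv_inner_nodup input t) ts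
    [] PySem.Dict.empty PySem.Dict.empty
    (by simp [pvSnapKeys, PySem.List.dedup]) (fun k => by simp [pvSnapVal])
    (fun t _ => by simp) hnodup
  have hB := PySem.Dict.items_foldl_insert_fresh (PySem.List.enumerate ts)
    (fun p => p.2) (fun p => pvSnapB d ts p.1) PySem.Dict.empty
    (fun a _ => by simp)
    (by rw [PySem.List.map_snd_enumerate]; exact hnodup)
  rw [hA, hB]
  have := pv_mainB d ts []
  simp only [List.length_nil, Nat.cast_zero, List.nil_append] at this
  simp [this]
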